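-- pv_equiv track=rewrite | github.com/Asgavar/studia | semestr_1_zima_2017_18/wdpp/lista11/l11z4.py | ppn
-- ===== SOURCE A (Python) =====
-- def ppn(word):
--     max_so_far = 1
--     ret_str = ''
--     mapping = {}
--     for c in word:
--         if c not in mapping:
--             mapping[c] = str(max_so_far)
--             max_so_far += 1
--         ret_str += mapping[c]
--     return '-'.join(ret_str)
-- ===== SOURCE B (Python) =====
-- def ppn(word):
--     # Rank-by-sorting: the id of a character is 1 + the rank of its first-occurrence
--     # position among the sorted distinct first-occurrence positions (no incremental
--     # id table is ever built).
--     firsts = sorted({word.index(c) for c in word})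
--     digits = ''.join(str(firsts.index(word.index(c)) + 1) for c in word)
--     return '-'.join(digits)
-- ===== Notes on version B (the rewrite author's own statement) =====
-- stated objective: alternative
-- what changed: Drops A's incremental id dict entirely: B computes each character's id as 1 + the rank of its first-occurrence position among the sorted set of distinct first-occurrence positions (sort-then-rank instead of an assign-as-you-go mapping).
import Mathlib
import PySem

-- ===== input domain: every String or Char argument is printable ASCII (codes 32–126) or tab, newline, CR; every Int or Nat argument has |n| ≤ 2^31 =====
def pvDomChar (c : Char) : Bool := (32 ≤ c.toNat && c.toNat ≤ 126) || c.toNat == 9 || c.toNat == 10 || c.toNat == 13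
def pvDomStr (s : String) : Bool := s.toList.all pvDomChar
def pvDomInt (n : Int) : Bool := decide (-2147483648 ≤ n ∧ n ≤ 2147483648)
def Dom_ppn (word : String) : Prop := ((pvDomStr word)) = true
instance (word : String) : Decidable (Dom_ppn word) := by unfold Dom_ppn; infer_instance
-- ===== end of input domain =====

-- B drops A's incremental id dict: each character's id is 1 + the rank of its
-- first-occurrence position in the sorted set of first-occurrence positions
-- (sort-then-rank); alternative algorithm, no speed claim.

-- ===== PORT A =====
-- loop state: (max_so_far, ret_str as List Char, mapping); Python's mapping[c] always hits here, ported as getD [].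
def ppn (word : String) : String :=
  let st := word.toList.foldl
    (fun (st : Int × List Char × PySem.Dict Char (List Char)) c =>
      if st.2.2.contains c = false then
        let m := st.2.2.insert c (PySem.Int.toChars st.1)
        (st.1 + 1, st.2.1 ++ m.getD c [], m)
      else
        (st.1, st.2.1 ++ st.2.2.getD c [], st.2.2))
    (1, ([] : List Char), PySem.Dict.empty)
  String.ofList (PySem.Chars.join ['-'] (st.2.1.map (fun c => [c])))

-- ===== PORT B =====
-- {word.index(c) for c in word} → Set.ofList of the first-occurrence positions; sorted(…) →
-- PySem.List.sorted; firsts.index(word.index(c)) always hits (ported as idxOf, which Python's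
-- .index equals whenever the element is present — it always is here).
def ppn_alt (word : String) : String :=
  let l := word.toList
  let firsts : List Int :=
    PySem.List.sorted (PySem.Set.ofList (l.map (fun c => (l.idxOf c : Int)))) (fun x => x) false
  let digits := l.flatMap (fun c =>
    PySem.Int.toChars ((firsts.idxOf ((l.idxOf c : Int)) : Int) + 1))
  String.ofList (PySem.Chars.join ['-'] (digits.map (fun c => [c])))

-- ===== PRECONDITION & SPEC =====
def Spec_ppn (word : String) (out : String) : Prop := out = ppn_alt word
instance (word : String) (out : String) : Decidable (Spec_ppn word out) := by unfold Spec_ppn; infer_instance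

-- ===== CLAIM =====
def Claim_equal_ppn : Prop := ∀ (word : String), Dom_ppn word → Spec_ppn word (ppn word)

-- ===== LEMMAS AND PROOFS =====

-- B's rank table viewed structurally: first-occurrence positions in first-appearance order.
def rankList (l : List Char) : List Int := (PySem.Set.ofList l).map (fun c => (l.idxOf c : Int))

-- A-side: the id table A's loop builds, reconstructed for an arbitrary distinct key list s.
def mkMap (s : List Char) : PySem.Dict Char (List Char) :=
  (PySem.List.enumerate s 1).foldl (fun d p => d.insert p.2 (PySem.Int.toChars p.1)) PySem.Dict.empty

theorem items_mkMap (s : List Char) (h : s.Nodup) :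
    (mkMap s).items = (PySem.List.enumerate s 1).map (fun p => (p.2, PySem.Int.toChars p.1)) := by
  unfold mkMap
  have := PySem.Dict.items_foldl_insert_fresh (PySem.List.enumerate s 1)
    (fun p => p.2) (fun p => PySem.Int.toChars p.1) PySem.Dict.empty
    (fun a _ => PySem.Dict.contains_empty _)
    (by simpa [PySem.List.map_snd_enumerate] using h)
  simpa using this

theorem keys_mkMap (s : List Char) (h : s.Nodup) : (mkMap s).keys = s := by
  simp only [PySem.Dict.keys, items_mkMap s h, List.map_map]
  exact PySem.List.map_snd_enumerate s 1

theorem getD_mkMap (s : List Char) (c : Char) (h : s.Nodup) (hc : c ∈ s) :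
    (mkMap s).getD c [] = PySem.Int.toChars (1 + (s.idxOf c : Int)) := by
  have hk : s.idxOf c < s.length := List.idxOf_lt_length_of_mem hc
  have hmem : ((1 + (s.idxOf c : Int)), c) ∈ PySem.List.enumerate s 1 := by
    rw [PySem.List.mem_enumerate_iff]
    exact ⟨s.idxOf c, hk, by rw [List.getElem_idxOf]⟩
  have hm : (c, PySem.Int.toChars (1 + (s.idxOf c : Int))) ∈ (mkMap s).items := by
    rw [items_mkMap s h]
    exact List.mem_map.mpr ⟨_, hmem, rfl⟩
  exact PySem.Dict.getD_of_mem_items _ hm (by rw [keys_mkMap s h]; exact h) _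

theorem insert_mkMap (s : List Char) (c : Char) (h : (s ++ [c]).Nodup) (hc : c ∉ s) :
    (mkMap s).insert c (PySem.Int.toChars ((s.length : Int) + 1)) = mkMap (s ++ [c]) := by
  have hs : s.Nodup := (List.nodup_append.mp h).1
  apply PySem.Dict.ext
  rw [PySem.Dict.items_insert_of_not_contains _ _ (by
    rw [PySem.Dict.contains_eq_decide_mem_keys, keys_mkMap s hs]; simpa using hc)]
  rw [items_mkMap s hs, items_mkMap _ h, PySem.List.enumerate_append]
  simp [add_comm]

theorem prefix_update (s l : List Char) : s <+: PySem.Set.update s l := by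
  induction l generalizing s with
  | nil => exact List.prefix_rfl
  | cons c l ih =>
    refine List.IsPrefix.trans ?_ (ih (PySem.Set.add s c))
    simp [PySem.Set.add]; split <;> simp

theorem getD_mkMap_prefix (s r : List Char) (c : Char) (h : (s ++ r).Nodup) (hc : c ∈ s) :
    (mkMap (s ++ r)).getD c [] = PySem.Int.toChars (1 + (s.idxOf c : Int)) := by
  rw [getD_mkMap _ c h (by simp [hc]), List.idxOf_append_of_mem hc]

-- the invariant of A's loop: started from a distinct seen-list s, it produces the ids read off the final table
theorem loopA (l : List Char) : ∀ (s ret : List Char), (PySem.Set.update s l).Nodup → s.Nodup →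
    l.foldl (fun (st : Int × List Char × PySem.Dict Char (List Char)) c =>
        if st.2.2.contains c = false then
          let m := st.2.2.insert c (PySem.Int.toChars st.1)
          (st.1 + 1, st.2.1 ++ m.getD c [], m)
        else
          (st.1, st.2.1 ++ st.2.2.getD c [], st.2.2))
      (((s.length : Int) + 1), ret, mkMap s)
    = (((PySem.Set.update s l).length : Int) + 1,
       ret ++ l.flatMap (fun c => (mkMap (PySem.Set.update s l)).getD c []),
       mkMap (PySem.Set.update s l)) := by
  induction l with
  | nil => intro s ret h hs; simp [PySem.Set.update]
  | cons c l ih =>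
    intro s ret h hs
    have hupd : PySem.Set.update s (c :: l) = PySem.Set.update (PySem.Set.add s c) l := rfl
    rw [List.foldl_cons]
    by_cases hc : c ∈ s
    · have hadd : PySem.Set.add s c = s := by simp [PySem.Set.add, PySem.Set.contains, hc]
      have hco : (mkMap s).contains c = true := by
        rw [PySem.Dict.contains_eq_decide_mem_keys, keys_mkMap s hs]; simpa using hc
      rw [hupd, hadd] at h ⊢
      simp only [hco]
      rw [if_neg (by simp)]
      rw [ih s (ret ++ (mkMap s).getD c []) h hs]
      obtain ⟨r, hr⟩ := prefix_update s l
      have hval : (mkMap (PySem.Set.update s l)).getD c [] = (mkMap s).getD c [] := by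
        rw [← hr] at h ⊢
        rw [getD_mkMap_prefix s r c h hc, getD_mkMap s c hs hc]
      simp [hval, List.append_assoc]
    · have hadd : PySem.Set.add s c = s ++ [c] := by simp [PySem.Set.add, PySem.Set.contains, hc]
      have hco : (mkMap s).contains c = false := by
        rw [PySem.Dict.contains_eq_decide_mem_keys, keys_mkMap s hs]; simpa using hc
      rw [hupd, hadd] at h ⊢
      have hsc : (s ++ [c]).Nodup := ((prefix_update (s ++ [c]) l).sublist.nodup h)
      have hins : (mkMap s).insert c (PySem.Int.toChars ((s.length : Int) + 1)) = mkMap (s ++ [c]) :=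
        insert_mkMap s c hsc hc
      simp only [hco]
      rw [if_pos trivial, PySem.Dict.getD_insert_self, hins]
      have hlen : (s.length : Int) + 1 + 1 = (((s ++ [c]).length : Int)) + 1 := by
        simp
      rw [hlen, ih (s ++ [c]) _ h hsc]
      obtain ⟨r, hr⟩ := prefix_update (s ++ [c]) l
      have hval : (mkMap (PySem.Set.update (s ++ [c]) l)).getD c [] =
          PySem.Int.toChars ((s.length : Int) + 1) := by
        rw [← hr]
        rw [getD_mkMap_prefix (s ++ [c]) r c (hr ▸ (PySem.Set.nodup_update _ _ hsc) : ((s ++ [c]) ++ r).Nodup) (by simp)]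
        simp [List.idxOf_append, hc, add_comm]
      simp [hval, List.append_assoc]

-- B-side: first-appearance order of the deduped word IS increasing first-occurrence position
theorem pairwise_idxOf (l : List Char) :
    (PySem.Set.ofList l).Pairwise (fun a b => l.idxOf a < l.idxOf b) := by
  induction l with
  | nil => simp [PySem.Set.ofList]
  | cons x xs ih =>
    rw [PySem.Set.ofList_cons]
    refine List.Pairwise.cons ?_ ?_
    · intro b hb
      have hbx : b ≠ x := ((PySem.Set.mem_discard _ _ _).mp hb).2
      rw [List.idxOf_cons_self, List.idxOf_cons_ne _ (Ne.symm hbx)]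
      omega
    · have hsub : (PySem.Set.discard (PySem.Set.ofList xs) x).Sublist (PySem.Set.ofList xs) := by
        simp [PySem.Set.discard]
      refine (ih.sublist hsub).imp_of_mem ?_
      intro a b ha hb hlt
      have hax : a ≠ x := ((PySem.Set.mem_discard _ _ _).mp ha).2
      have hbx : b ≠ x := ((PySem.Set.mem_discard _ _ _).mp hb).2
      rw [List.idxOf_cons_ne _ (Ne.symm hax), List.idxOf_cons_ne _ (Ne.symm hbx)]
      omega

theorem idxOf_inj (l : List Char) {a b : Char} (ha : a ∈ l) (hb : b ∈ l)
    (h : l.idxOf a = l.idxOf b) : a = b := by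
  have ha' := List.getElem_idxOf (List.idxOf_lt_length_of_mem ha)
  have hb' := List.getElem_idxOf (List.idxOf_lt_length_of_mem hb)
  rw [← ha', ← hb']
  congr 1

theorem nodup_rankList (l : List Char) : (rankList l).Nodup := by
  refine List.Nodup.map_on ?_ (PySem.Set.nodup_ofList l)
  intro a ha b hb hfab
  exact idxOf_inj l ((PySem.Set.mem_ofList _ _).mp ha) ((PySem.Set.mem_ofList _ _).mp hb) (by exact_mod_cast hfab)

theorem firsts_eq (l : List Char) :
    PySem.List.sorted (PySem.Set.ofList (l.map (fun c => (l.idxOf c : Int)))) (fun x => x) false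
      = rankList l := by
  refine PySem.List.sorted_eq_of_perm_of_pairwise_lt _ _ _ ?_ ?_
  · rw [List.perm_ext_iff_of_nodup (nodup_rankList l) (PySem.Set.nodup_ofList _)]
    intro v
    rw [PySem.Set.mem_ofList]
    unfold rankList
    simp only [List.mem_map]
    constructor
    · rintro ⟨c, hc, rfl⟩; exact ⟨c, (PySem.Set.mem_ofList _ _).mp hc, rfl⟩
    · rintro ⟨c, hc, rfl⟩; exact ⟨c, (PySem.Set.mem_ofList _ _).mpr hc, rfl⟩
  · unfold rankList
    rw [List.pairwise_map]
    exact (pairwise_idxOf l).imp (by intro a b h; exact_mod_cast h)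

theorem idxOf_map_rank (s : List Char) (f : Char → Int)
    (hinj : ∀ a ∈ s, ∀ b ∈ s, f a = f b → a = b) (c : Char) (hc : c ∈ s) :
    (s.map f).idxOf (f c) = s.idxOf c := by
  induction s with
  | nil => simp at hc
  | cons a s ih =>
    by_cases hca : c = a
    · subst hca; simp
    · have hc' : c ∈ s := by
        rcases List.mem_cons.mp hc with h | h
        · exact absurd h hca
        · exact h
      have hfa : f c ≠ f a := fun h => hca (hinj c hc a (List.mem_cons_self ..) h)
      rw [List.map_cons, List.idxOf_cons_ne _ (Ne.symm hfa), List.idxOf_cons_ne _ (Ne.symm hca)]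
      rw [ih (fun x hx y hy => hinj x (List.mem_cons_of_mem _ hx) y (List.mem_cons_of_mem _ hy)) hc']

theorem rank_eq (l : List Char) (c : Char) (hc : c ∈ l) :
    (rankList l).idxOf ((l.idxOf c : Int)) = (PySem.Set.ofList l).idxOf c := by
  unfold rankList
  exact idxOf_map_rank (PySem.Set.ofList l) (fun c => (l.idxOf c : Int))
    (fun a ha b hb h => idxOf_inj l ((PySem.Set.mem_ofList _ _).mp ha) ((PySem.Set.mem_ofList _ _).mp hb)
      (by simpa using h))
    c ((PySem.Set.mem_ofList _ _).mpr hc)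

theorem flatMap_congr_mem (l : List Char) (f g : Char → List Char)
    (h : ∀ c ∈ l, f c = g c) : l.flatMap f = l.flatMap g := by
  induction l with
  | nil => rfl
  | cons a s ih =>
    simp only [List.flatMap_cons, h a (List.mem_cons_self ..),
      ih (fun c hc => h c (List.mem_cons_of_mem _ hc))]

theorem ppn_eq (word : String) : ppn word = ppn_alt word := by
  unfold ppn ppn_alt
  have hnd : (PySem.Set.update ([] : List Char) word.toList).Nodup :=
    PySem.Set.nodup_update _ _ List.nodup_nil
  have hinit : ((1 : Int), ([] : List Char), (PySem.Dict.empty : PySem.Dict Char (List Char)))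
      = (((([] : List Char).length : Int)) + 1, ([] : List Char), mkMap []) := rfl
  rw [hinit, loopA word.toList [] [] hnd List.nodup_nil]
  have h0 : PySem.Set.update ([] : List Char) word.toList = PySem.Set.ofList word.toList :=
    PySem.Set.update_nil_left _
  simp only [h0, firsts_eq, List.nil_append]
  congr 1
  congr 1
  congr 1
  refine flatMap_congr_mem _ _ _ ?_
  intro c hc
  rw [getD_mkMap _ c (PySem.Set.nodup_ofList _) ((PySem.Set.mem_ofList _ _).mpr hc),
    rank_eq word.toList c hc, add_comm]

-- ===== VERDICT =====
theorem ppn_spec : Claim_equal_ppn := fun word _ => ppn_eq word
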